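-- pv_equiv track=rewrite | github.com/AaronGG11/Natural-Language-Processing | 11_Summarization/index.py | getSentencesByAspects
-- ===== SOURCE A (Python) =====
-- def getSentencesByAspects(SENTENCES, ASPECTS):
--     result = {}
--     for aspect in ASPECTS:
--         result[aspect] = []
--
--     for sentence in SENTENCES:
--         for aspect in ASPECTS:
--             if aspect in sentence:
--                 result[aspect].append(" ".join(sentence))
--
--     return result
-- ===== SOURCE B (Python) =====
-- def getSentencesByAspects(SENTENCES, ASPECTS):
--     index = {}
--     for sentence in SENTENCES:
--         joined = " ".join(sentence)
--         for word in dict.fromkeys(sentence):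
--             index.setdefault(word, []).append(joined)
--     return {aspect: index.get(aspect, []) for aspect in ASPECTS}
-- ===== Notes on version B (the rewrite author's own statement) =====
-- stated objective: alternative
-- what changed: Builds an inverted index word->joined sentences in one pass over SENTENCES, then assembles the result by a single lookup per aspect, removing the per-sentence scan over all of ASPECTS; Pre_ excludes inputs where an aspect listed more than once in ASPECTS occurs in some sentence, the duplicate-dict-key corner on which A's shared bucket receives the sentence once per duplicate occurrence while B lists it once.
-- outside the precondition, e.g. on getSentencesByAspects([['a']], ['a', 'a']): A returns {'a': ['a', 'a']}, B returns {'a': ['a']}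
import Mathlib
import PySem

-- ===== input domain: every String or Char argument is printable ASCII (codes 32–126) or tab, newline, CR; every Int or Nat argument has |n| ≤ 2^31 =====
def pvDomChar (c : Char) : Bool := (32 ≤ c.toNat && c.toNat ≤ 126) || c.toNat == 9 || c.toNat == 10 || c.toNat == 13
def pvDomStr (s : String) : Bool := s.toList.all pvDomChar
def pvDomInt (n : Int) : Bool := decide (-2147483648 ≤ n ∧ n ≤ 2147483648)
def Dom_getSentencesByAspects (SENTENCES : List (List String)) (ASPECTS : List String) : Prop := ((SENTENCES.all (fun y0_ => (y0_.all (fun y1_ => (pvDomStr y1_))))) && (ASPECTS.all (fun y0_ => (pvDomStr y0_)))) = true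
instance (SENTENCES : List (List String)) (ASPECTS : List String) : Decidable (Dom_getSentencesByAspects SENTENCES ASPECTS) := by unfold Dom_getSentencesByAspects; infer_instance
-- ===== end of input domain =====

-- B builds an inverted index word -> joined sentences in one pass over SENTENCES and then
-- assembles the result by one lookup per aspect (objective: alternative; the per-sentence scan
-- over all of ASPECTS disappears).

-- ===== PORT A =====
def getSentencesByAspects (SENTENCES : List (List String)) (ASPECTS : List String) : List (String × List String) :=
  let result : PySem.Dict String (List String) :=
    ASPECTS.foldl (fun d aspect => d.insert aspect []) PySem.Dict.empty
  let result := SENTENCES.foldl (fun d sentence =>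
      ASPECTS.foldl (fun d aspect =>
        if aspect ∈ sentence then
          -- result[aspect].append(" ".join(sentence)); aspect is always a key here
          d.modify aspect [] (fun v => v ++ [PySem.Str.join " " sentence])
        else d) d) result
  result.items

-- ===== PORT B =====
def getSentencesByAspects_alt (SENTENCES : List (List String)) (ASPECTS : List String) : List (String × List String) :=
  let index : PySem.Dict String (List String) :=
    SENTENCES.foldl (fun d sentence =>
      let joined := PySem.Str.join " " sentence
      -- for word in dict.fromkeys(sentence): index.setdefault(word, []).append(joined)
      (PySem.List.dedup sentence).foldl (fun d w =>
        d.modify w [] (fun v => v ++ [joined])) d) PySem.Dict.empty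
  -- {aspect: index.get(aspect, []) for aspect in ASPECTS}
  (ASPECTS.foldl (fun d aspect => d.insert aspect (index.getD aspect [])) PySem.Dict.empty).items

-- ===== PRECONDITION & SPEC =====
-- Pre_ excludes the duplicate-dict-key corner: ASPECTS listing the same aspect more than once while that
-- aspect occurs in some sentence — there A appends the matching sentence to the shared bucket once per
-- duplicate occurrence and B lists it once; both are defensible readings of a duplicated key.
def Pre_getSentencesByAspects (SENTENCES : List (List String)) (ASPECTS : List String) : Prop :=
  ∀ a ∈ ASPECTS, 2 ≤ ASPECTS.count a → ∀ s ∈ SENTENCES, a ∉ s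
instance (SENTENCES : List (List String)) (ASPECTS : List String) : Decidable (Pre_getSentencesByAspects SENTENCES ASPECTS) := by unfold Pre_getSentencesByAspects; infer_instance

def pvWitness_getSentencesByAspects : List (List String) × List String := ([["a", "b"], ["b"]], ["a", "b"])

def Spec_getSentencesByAspects (SENTENCES : List (List String)) (ASPECTS : List String) (out : List (String × List String)) : Prop := out = getSentencesByAspects_alt SENTENCES ASPECTS
instance (SENTENCES : List (List String)) (ASPECTS : List String) (out : List (String × List String)) : Decidable (Spec_getSentencesByAspects SENTENCES ASPECTS out) := by unfold Spec_getSentencesByAspects; infer_instance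

-- ===== CLAIM (what is proved, stated in full; the proofs are below) =====
def Claim_equal_getSentencesByAspects : Prop := ∀ (SENTENCES : List (List String)) (ASPECTS : List String), Dom_getSentencesByAspects SENTENCES ASPECTS → Pre_getSentencesByAspects SENTENCES ASPECTS → Spec_getSentencesByAspects SENTENCES ASPECTS (getSentencesByAspects SENTENCES ASPECTS)

-- ===== LEMMAS AND PROOFS =====

-- A's inner loop: keys are preserved when every matching aspect is already a key
lemma pv_keysA (s : List String) (x : String) :
    ∀ (l : List String) (d : PySem.Dict String (List String)), (∀ a ∈ l, a ∈ d.keys) →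
      (l.foldl (fun d a => if a ∈ s then d.modify a [] (fun v => v ++ [x]) else d) d).keys = d.keys := by
  intro l
  induction l with
  | nil => intro d _; simp
  | cons a t ih =>
    intro d h
    simp only [List.foldl_cons]
    by_cases ha : a ∈ s
    · have hc : d.contains a = true := (PySem.Dict.contains_iff_mem_keys d a).2 (h a (by simp))
      have hk : (d.modify a [] (fun v => v ++ [x])).keys = d.keys := by
        rw [PySem.Dict.keys_modify, PySem.Dict.keys_insert_of_contains _ _ hc]
      simp only [ha, if_true]
      rw [ih _ (fun b hb => by rw [hk]; exact h b (by simp [hb])), hk]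
    · simp only [ha, if_false]
      exact ih d (fun b hb => h b (by simp [hb]))

-- A's inner loop: the bucket at k gains one copy of x per occurrence of k in l, when k ∈ s
lemma pv_getDA (s : List String) (x : String) :
    ∀ (l : List String) (d : PySem.Dict String (List String)) (k : String),
      (l.foldl (fun d a => if a ∈ s then d.modify a [] (fun v => v ++ [x]) else d) d).getD k []
        = d.getD k [] ++ (if k ∈ s then List.replicate (l.count k) x else []) := by
  intro l
  induction l with
  | nil => intro d k; simp
  | cons a t ih =>
    intro d k
    simp only [List.foldl_cons]
    by_cases ha : a ∈ s
    · simp only [ha, if_true, ih, PySem.Dict.getD_modify]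
      by_cases hk : k = a
      · subst hk
        simp [ha, List.count_cons_self, List.replicate_succ, List.append_assoc]
      · have hak : ¬ a = k := fun h => hk h.symm
        simp [hak, hk]
    · simp only [ha, if_false, ih]
      by_cases hk : k = a
      · subst hk; simp [ha]
      · have hak : ¬ a = k := fun h => hk h.symm
        simp [hak]

-- A's outer loop: per key k, sentences containing k each contribute (count of k in ASPECTS) copies
lemma pv_outerA (ASPECTS : List String) :
    ∀ (S : List (List String)) (d : PySem.Dict String (List String)), (∀ a ∈ ASPECTS, a ∈ d.keys) →
      ∀ k,
      (S.foldl (fun d sentence =>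
          ASPECTS.foldl (fun d aspect =>
            if aspect ∈ sentence then d.modify aspect [] (fun v => v ++ [PySem.Str.join " " sentence]) else d) d) d).getD k []
        = d.getD k [] ++ S.flatMap (fun s => if k ∈ s then List.replicate (ASPECTS.count k) (PySem.Str.join " " s) else []) := by
  intro S
  induction S with
  | nil => intro d _ k; simp
  | cons s t ih =>
    intro d hmem k
    simp only [List.foldl_cons]
    have hkeys := pv_keysA s (PySem.Str.join " " s) ASPECTS d hmem
    rw [ih _ (fun a ha => hkeys ▸ hmem a ha), pv_getDA]
    simp [List.append_assoc]

-- A's outer loop preserves keys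
lemma pv_keysA_outer (ASPECTS : List String) :
    ∀ (S : List (List String)) (d : PySem.Dict String (List String)), (∀ a ∈ ASPECTS, a ∈ d.keys) →
      (S.foldl (fun d sentence =>
          ASPECTS.foldl (fun d aspect =>
            if aspect ∈ sentence then d.modify aspect [] (fun v => v ++ [PySem.Str.join " " sentence]) else d) d) d).keys = d.keys := by
  intro S
  induction S with
  | nil => intro d _; simp
  | cons s t ih =>
    intro d hmem
    simp only [List.foldl_cons]
    have hkeys := pv_keysA s (PySem.Str.join " " s) ASPECTS d hmem
    rw [ih _ (fun a ha => hkeys ▸ hmem a ha), hkeys]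

-- getD of a fold that inserts f a at every a of l (f independent of the accumulator)
lemma pv_fill_getD (f : String → List String) :
    ∀ (l : List String) (d : PySem.Dict String (List String)) (k : String),
      (l.foldl (fun d a => d.insert a (f a)) d).getD k [] = if k ∈ l then f k else d.getD k [] := by
  intro l
  induction l with
  | nil => intro d k; simp
  | cons a t ih =>
    intro d k
    simp only [List.foldl_cons, ih, PySem.Dict.getD_insert, List.mem_cons]
    by_cases h1 : k ∈ t <;> by_cases h2 : k = a <;> simp [h1, h2]

-- B's per-sentence loop: the bucket at k gains one copy of x per occurrence of k in l
lemma pv_getDB (x : String) :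
    ∀ (l : List String) (d : PySem.Dict String (List String)) (k : String),
      (l.foldl (fun d w => d.modify w [] (fun v => v ++ [x])) d).getD k []
        = d.getD k [] ++ List.replicate (l.count k) x := by
  intro l
  induction l with
  | nil => intro d k; simp
  | cons w t ih =>
    intro d k
    simp only [List.foldl_cons, ih, PySem.Dict.getD_modify]
    by_cases hk : k = w
    · subst hk
      simp [List.count_cons_self, List.replicate_succ, List.append_assoc]
    · have hwk : ¬ w = k := fun h => hk h.symm
      simp [hwk, hk]

-- B's index: per key k, one joined copy of each sentence containing k
lemma pv_outerB :
    ∀ (S : List (List String)) (d : PySem.Dict String (List String)) (k : String),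
      (S.foldl (fun d sentence =>
          (PySem.List.dedup sentence).foldl (fun d w =>
            d.modify w [] (fun v => v ++ [PySem.Str.join " " sentence])) d) d).getD k []
        = d.getD k [] ++ S.flatMap (fun s => if k ∈ s then [PySem.Str.join " " s] else []) := by
  intro S
  induction S with
  | nil => intro d k; simp
  | cons s t ih =>
    intro d k
    simp only [List.foldl_cons]
    rw [ih, pv_getDB]
    have hcnt : (PySem.List.dedup s).count k = if k ∈ s then 1 else 0 := by
      by_cases hm : k ∈ s
      · rw [if_pos hm]
        exact List.count_eq_one_of_mem (PySem.List.nodup_dedup s) ((PySem.List.mem_dedup s k).2 hm)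
      · rw [if_neg hm]
        exact List.count_eq_zero.2 (fun h => hm ((PySem.List.mem_dedup s k).1 h))
    rw [hcnt]
    by_cases hm : k ∈ s <;> simp [hm, List.append_assoc]

-- both final dicts are keyed by the distinct aspects, in first-occurrence order
lemma pv_keysA_final (SENTENCES : List (List String)) (ASPECTS : List String) :
    (SENTENCES.foldl (fun d sentence =>
        ASPECTS.foldl (fun d aspect =>
          if aspect ∈ sentence then d.modify aspect [] (fun v => v ++ [PySem.Str.join " " sentence]) else d) d)
      (ASPECTS.foldl (fun d aspect => d.insert aspect []) PySem.Dict.empty)).keys = PySem.Set.ofList ASPECTS := by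
  have h0 : (ASPECTS.foldl (fun d aspect => d.insert aspect ([] : List String)) PySem.Dict.empty).keys
      = PySem.Set.ofList ASPECTS := by
    rw [PySem.Dict.keys_foldl_insert (f := fun _ _ => []), PySem.Dict.keys_empty]
    rfl
  rw [pv_keysA_outer ASPECTS SENTENCES _ (by
      intro a ha; rw [h0]; exact (PySem.Set.mem_ofList ASPECTS a).2 ha), h0]

lemma pv_keysB_final (f : String → List String) (ASPECTS : List String) :
    (ASPECTS.foldl (fun d aspect => d.insert aspect (f aspect)) PySem.Dict.empty).keys
      = PySem.Set.ofList ASPECTS := by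
  rw [PySem.Dict.keys_foldl_insert (f := fun _ a => f a), PySem.Dict.keys_empty]
  rfl

-- the bucket A builds for an aspect k present in ASPECTS
lemma pv_bucketA (SENTENCES : List (List String)) (ASPECTS : List String) (k : String) (hk : k ∈ ASPECTS) :
    (SENTENCES.foldl (fun d sentence =>
        ASPECTS.foldl (fun d aspect =>
          if aspect ∈ sentence then d.modify aspect [] (fun v => v ++ [PySem.Str.join " " sentence]) else d) d)
      (ASPECTS.foldl (fun d aspect => d.insert aspect []) PySem.Dict.empty)).getD k []
    = SENTENCES.flatMap (fun s => if k ∈ s then List.replicate (ASPECTS.count k) (PySem.Str.join " " s) else []) := by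
  have h0 : (ASPECTS.foldl (fun d aspect => d.insert aspect ([] : List String)) PySem.Dict.empty).keys
      = PySem.Set.ofList ASPECTS := by
    rw [PySem.Dict.keys_foldl_insert (f := fun _ _ => []), PySem.Dict.keys_empty]
    rfl
  rw [pv_outerA ASPECTS SENTENCES _ (by
      intro a ha; rw [h0]; exact (PySem.Set.mem_ofList ASPECTS a).2 ha)]
  rw [pv_fill_getD (fun _ => [])]
  simp [hk]

-- the bucket B builds for an aspect k present in ASPECTS
lemma pv_bucketB (SENTENCES : List (List String)) (ASPECTS : List String) (k : String) (hk : k ∈ ASPECTS) :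
    (ASPECTS.foldl (fun d aspect => d.insert aspect
        ((SENTENCES.foldl (fun d sentence =>
            (PySem.List.dedup sentence).foldl (fun d w =>
              d.modify w [] (fun v => v ++ [PySem.Str.join " " sentence])) d) PySem.Dict.empty).getD aspect []))
      PySem.Dict.empty).getD k []
    = SENTENCES.flatMap (fun s => if k ∈ s then [PySem.Str.join " " s] else []) := by
  rw [pv_fill_getD]
  simp only [hk, if_true]
  rw [pv_outerB]
  simp

-- ===== VERDICT (by name: the statement is the Claim_ definition above) =====
theorem getSentencesByAspects_spec : Claim_equal_getSentencesByAspects := by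
  intro SENTENCES ASPECTS _ hPre
  unfold Spec_getSentencesByAspects
  simp only [getSentencesByAspects, getSentencesByAspects_alt]
  rw [PySem.Dict.items_eq_map_keys _ (by rw [pv_keysA_final]; exact PySem.Set.nodup_ofList ASPECTS) [],
      PySem.Dict.items_eq_map_keys _ (by rw [pv_keysB_final]; exact PySem.Set.nodup_ofList ASPECTS) [],
      pv_keysA_final, pv_keysB_final]
  apply List.map_congr_left
  intro k hkset
  have hk : k ∈ ASPECTS := (PySem.Set.mem_ofList ASPECTS k).1 hkset
  rw [pv_bucketA SENTENCES ASPECTS k hk, pv_bucketB SENTENCES ASPECTS k hk]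
  apply congrArg (Prod.mk k)
  by_cases hc : 2 ≤ ASPECTS.count k
  · -- k is a duplicated aspect: Pre_ says no sentence contains it, so both buckets are empty
    have hnone := hPre k hk hc
    exact List.flatMap_congr (fun s hs => by
      have : k ∉ s := hnone s hs
      simp [this])
  · -- k occurs exactly once in ASPECTS
    have h1 : 1 ≤ ASPECTS.count k := List.count_pos_iff.2 hk
    have hcnt : ASPECTS.count k = 1 := by omega
    rw [hcnt]
    simp
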